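-- pv_equiv track=rewrite | github.com/jeyansaran620/DSA_python | Data Structures/Week 2 & 3/job_queue.py | assign_jobs
-- ===== SOURCE A (Python) =====
-- from collections import namedtuple
--
-- AssignedJob = namedtuple("AssignedJob", ["worker", "started_at"])
--
-- def SiftDown(H,i):
--     maxIndex = i
--     l = (i*2) + 1
--     r = (i*2) + 2
--
--     if l <= len(H) - 1:
--         if H[l][0] < H[maxIndex][0]:
--             maxIndex = l
--         elif H[l][0] == H[maxIndex][0] and H[l][1] < H[maxIndex][1]:
--             maxIndex = l
--
--     if r <= len(H) - 1:
--         if H[r][0] < H[maxIndex][0]: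
--             maxIndex = r
--         elif H[r][0] == H[maxIndex][0] and H[r][1] < H[maxIndex][1]:
--             maxIndex = r
--
--     if i != maxIndex:
--         H[i], H[maxIndex] = H[maxIndex],H[i]
--         H = SiftDown(H,maxIndex)
--     return H
--
-- def assign_jobs(n_workers, jobs):
--     # TODO: replace this code with a faster algorithm.
--     result = []
--     next_free_time = [[0,i] for i in range(n_workers)]
--     for job in jobs:
--         next_free_time = SiftDown(next_free_time,0)
--         result.append(AssignedJob( next_free_time[0][1],  next_free_time[0][0]))
--         next_free_time[0][0] += job
--
--     return result
-- ===== SOURCE B (Python) =====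
-- from collections import namedtuple
--
-- AssignedJob = namedtuple("AssignedJob", ["worker", "started_at"])
--
-- def assign_jobs(n_workers, jobs):
--     # Linear min-scan over worker free times instead of a hand-rolled binary heap.
--     times = [0] * n_workers
--     result = []
--     for job in jobs:
--         best = 0
--         best_t = times[0]
--         for i in range(1, n_workers):
--             if times[i] < best_t:
--                 best = i
--                 best_t = times[i]
--         result.append(AssignedJob(best, best_t))
--         times[best] += job
--     return result
-- ===== Notes on version B (the rewrite author's own statement) =====
-- stated objective: simpler
-- what changed: Replaces A's hand-rolled binary min-heap (recursive SiftDown after each assignment) with a plain linear scan over the workers' free times, picking the lowest-index minimum with a strict '<' comparison.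
import Mathlib
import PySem

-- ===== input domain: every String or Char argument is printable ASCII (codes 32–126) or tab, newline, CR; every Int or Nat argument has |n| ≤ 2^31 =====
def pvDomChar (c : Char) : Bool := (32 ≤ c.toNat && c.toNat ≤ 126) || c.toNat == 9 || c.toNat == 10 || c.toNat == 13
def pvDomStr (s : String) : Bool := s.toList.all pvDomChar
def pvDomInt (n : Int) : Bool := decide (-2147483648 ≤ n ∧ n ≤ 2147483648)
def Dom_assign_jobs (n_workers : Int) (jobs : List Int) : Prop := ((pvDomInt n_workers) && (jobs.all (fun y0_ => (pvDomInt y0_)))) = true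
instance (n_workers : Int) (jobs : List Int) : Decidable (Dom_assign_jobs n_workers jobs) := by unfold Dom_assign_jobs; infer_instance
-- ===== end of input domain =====

-- B replaces A's hand-rolled binary heap (repeated SiftDown from the root) by a plain
-- linear minimum scan over the workers' free times; same greedy result, simpler code.

-- ===== PORT A =====
-- Python lists [time, index] are ported as pairs (time, index).
-- `hget H k` is Python's `H[k]`; every access inside SiftDown is guarded in-bounds by
-- the surrounding condition, and `H[0]` in assign_jobs is in-bounds exactly on Pre_.
def hget (H : List (Int × Int)) (k : Nat) : Int × Int := H.getD k (0, 0)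

-- `plt p q` is the comparison A writes out twice: H[x][0] < H[y][0], or equal first
-- components and H[x][1] < H[y][1]. (reducible so the `if`s below are decidable)
@[reducible] def plt (p q : Int × Int) : Prop := p.1 < q.1 ∨ (p.1 = q.1 ∧ p.2 < q.2)

def siftDown (H : List (Int × Int)) (i : Nat) : List (Int × Int) :=
  let m1 := if 2*i+1 < H.length ∧ plt (hget H (2*i+1)) (hget H i) then 2*i+1 else i
  let m2 := if 2*i+2 < H.length ∧ plt (hget H (2*i+2)) (hget H m1) then 2*i+2 else m1
  if i ≠ m2 then
    siftDown ((H.set i (hget H m2)).set m2 (hget H i)) m2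
  else H
termination_by H.length - i
decreasing_by
  simp only [List.length_set]
  simp only [m2, m1] at *
  split_ifs at * <;> omega

def assign_jobs (n_workers : Int) (jobs : List Int) : List (Int × Int) :=
  let init := (List.range n_workers.toNat).map (fun i : Nat => ((0 : Int), (i : Int)))
  (jobs.foldl (fun (st : List (Int × Int) × List (Int × Int)) job =>
      let H := siftDown st.2 0
      let p := hget H 0
      (st.1 ++ [(p.2, p.1)], H.set 0 (p.1 + job, p.2)))
    ([], init)).1

-- ===== PORT B =====
-- Source B's inner loop `for i in range(1, n_workers): if times[i] < best_t: best, best_t = i, times[i]`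
-- is the fold over times[1:] with its indices (zipIdx pairs are (element, index));
-- `times.getD 0 0` is Python's `times[0]`, in-bounds exactly on Pre_.
def assign_jobs_alt (n_workers : Int) (jobs : List Int) : List (Int × Int) :=
  (jobs.foldl (fun (st : List (Int × Int) × List Int) job =>
      let times := st.2
      let b := (times.zipIdx.drop 1).foldl
        (fun (b : Nat × Int) p => if p.1 < b.2 then (p.2, p.1) else b) (0, times.getD 0 0)
      (st.1 ++ [((b.1 : Int), b.2)], times.set b.1 (b.2 + job)))
    ([], List.replicate n_workers.toNat 0)).1

-- ===== PRECONDITION & SPEC =====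
-- Pre_ excludes n_workers ≤ 0 with a non-empty job list: there both Pythons raise
-- IndexError (A on next_free_time[0], B on times[best]).
def Pre_assign_jobs (n_workers : Int) (jobs : List Int) : Prop :=
  jobs = [] ∨ 1 ≤ n_workers

instance (n_workers : Int) (jobs : List Int) : Decidable (Pre_assign_jobs n_workers jobs) := by
  unfold Pre_assign_jobs; infer_instance

def pvWitness_assign_jobs : Int × List Int := (2, [3, 1, 2])

def Spec_assign_jobs (n_workers : Int) (jobs : List Int) (out : List (Int × Int)) : Prop := out = assign_jobs_alt n_workers jobs
instance (n_workers : Int) (jobs : List Int) (out : List (Int × Int)) : Decidable (Spec_assign_jobs n_workers jobs out) := by unfold Spec_assign_jobs; infer_instance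

-- ===== CLAIM (what is proved, stated in full; the proofs are below) =====
def Claim_equal_assign_jobs : Prop := ∀ (n_workers : Int) (jobs : List Int), Dom_assign_jobs n_workers jobs → Pre_assign_jobs n_workers jobs → Spec_assign_jobs n_workers jobs (assign_jobs n_workers jobs)

-- ===== LEMMAS AND PROOFS =====

def childOf (a b : Nat) : Prop := b = 2*a+1 ∨ b = 2*a+2
def IsHeap (H : List (Int × Int)) : Prop :=
  ∀ a b, childOf a b → b < H.length → ¬ plt (hget H b) (hget H a)
def SDpre (H : List (Int × Int)) (i : Nat) : Prop :=
  (∀ a b, childOf a b → b < H.length → a ≠ i → ¬ plt (hget H b) (hget H a)) ∧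
  (∀ b, childOf i b → b < H.length → ∀ p, childOf p i → ¬ plt (hget H b) (hget H p))

lemma plt_trans {a b c : Int × Int} (h1 : plt a b) (h2 : plt b c) : plt a c := by
  obtain ⟨x1,x2⟩ := a; obtain ⟨y1,y2⟩ := b; obtain ⟨z1,z2⟩ := c
  simp only [plt] at *; omega
lemma plt_asymm {a b : Int × Int} (h : plt a b) : ¬ plt b a := by
  obtain ⟨x1,x2⟩ := a; obtain ⟨y1,y2⟩ := b; simp only [plt] at *; omega
lemma plt_irrefl (a : Int × Int) : ¬ plt a a := by
  obtain ⟨x1,x2⟩ := a; simp only [plt]; omega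
lemma not_plt_trans {a b c : Int × Int} (h1 : ¬ plt b a) (h2 : ¬ plt c b) : ¬ plt c a := by
  obtain ⟨x1,x2⟩ := a; obtain ⟨y1,y2⟩ := b; obtain ⟨z1,z2⟩ := c
  simp only [plt] at *; omega
lemma plt_antisymm {a b : Int × Int} (h1 : ¬ plt a b) (h2 : ¬ plt b a) : a = b := by
  obtain ⟨x1,x2⟩ := a; obtain ⟨y1,y2⟩ := b
  simp only [plt, Prod.mk.injEq] at *; omega

lemma getD_set_self {α : Type} (L : List α) (i : Nat) (x d : α) (h : i < L.length) :
    (L.set i x).getD i d = x := by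
  simp [List.getD, List.getElem?_set_self', h]
lemma getD_set_ne {α : Type} (L : List α) (i k : Nat) (x d : α) (h : i ≠ k) :
    (L.set i x).getD k d = L.getD k d := by
  simp [List.getD, List.getElem?_set_ne, h]
lemma hget_set_self (H : List (Int × Int)) (i : Nat) (x : Int × Int) (h : i < H.length) :
    hget (H.set i x) i = x := getD_set_self H i x (0,0) h
lemma hget_set_ne (H : List (Int × Int)) (i k : Nat) (x : Int × Int) (h : i ≠ k) :
    hget (H.set i x) k = hget H k := getD_set_ne H i k x (0,0) h

def swapF (i m k : Nat) : Nat := if k = m then i else if k = i then m else k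

lemma swapF_invol (i m k : Nat) : swapF i m (swapF i m k) = k := by
  unfold swapF; split_ifs <;> omega

lemma hget_swap (H : List (Int × Int)) (i m k : Nat) (hi : i < H.length) (hm : m < H.length)
    (hne : i ≠ m) :
    hget ((H.set i (hget H m)).set m (hget H i)) k = hget H (swapF i m k) := by
  unfold swapF
  by_cases h1 : k = m
  · subst h1
    rw [hget_set_self _ _ _ (by simpa using hm)]
    simp
  · rw [hget_set_ne _ _ _ _ (Ne.symm h1)]
    by_cases h2 : k = i
    · subst h2; rw [hget_set_self _ _ _ hi]; simp [h1]
    · rw [hget_set_ne _ _ _ _ (Ne.symm h2)]; simp [h1, h2]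

lemma sd_length (H : List (Int × Int)) (i : Nat) : (siftDown H i).length = H.length := by
  fun_induction siftDown with
  | _ => simp_all [List.length_set]

lemma sd_perm (H : List (Int × Int)) (i : Nat) : ∃ f : Nat → Nat,
    (∀ k, k < H.length → f k < H.length) ∧
    (∀ k k', k < H.length → k' < H.length → f k = f k' → k = k') ∧
    (∀ j, j < H.length → ∃ k, k < H.length ∧ f k = j) ∧
    (∀ k, k < H.length → hget (siftDown H i) k = hget H (f k)) := by
  fun_induction siftDown with
  | case1 H i m1 m2 h ih =>
    have key : i < m2 ∧ m2 < H.length := by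
      simp only [m2, m1] at h ⊢
      split_ifs at h ⊢ <;> omega
    obtain ⟨him2, hm2len⟩ := key
    have hlen : ((H.set i (hget H m2)).set m2 (hget H i)).length = H.length := by simp
    rw [hlen] at ih
    obtain ⟨f, hb, hinj, hsurj, hpt⟩ := ih
    refine ⟨fun k => swapF i m2 (f k), ?_, ?_, ?_, ?_⟩
    · intro k hk
      have := hb k hk
      show swapF i m2 (f k) < H.length
      unfold swapF; split_ifs <;> omega
    · intro k k' hk hk' heq
      apply hinj k k' hk hk'
      have := congrArg (swapF i m2) heq
      simp only [] at this
      rwa [swapF_invol, swapF_invol] at this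
    · intro j hj
      have hj' : swapF i m2 j < H.length := by unfold swapF; split_ifs <;> omega
      obtain ⟨k, hk, hfk⟩ := hsurj (swapF i m2 j) hj'
      refine ⟨k, hk, ?_⟩
      show swapF i m2 (f k) = j
      rw [hfk, swapF_invol]
    · intro k hk
      show _ = hget H (swapF i m2 (f k))
      rw [hpt k hk, hget_swap H i m2 (f k) (by omega) hm2len (by omega)]
  | case2 H i m1 m2 h =>
    exact ⟨id, fun k hk => hk, fun k k' _ _ h => h, fun j hj => ⟨j, hj, rfl⟩,
      fun k hk => rfl⟩

lemma swap_SDpre (H : List (Int × Int)) (i m2 : Nat)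
    (hpre : SDpre H i) (him2 : i < m2) (hm2len : m2 < H.length)
    (hchild : childOf i m2)
    (hbeat : plt (hget H m2) (hget H i))
    (hminl : 2*i+1 < H.length → ¬ plt (hget H (2*i+1)) (hget H m2))
    (hminr : 2*i+2 < H.length → ¬ plt (hget H (2*i+2)) (hget H m2)) :
    SDpre ((H.set i (hget H m2)).set m2 (hget H i)) m2 := by
  have hi : i < H.length := by omega
  have hne : i ≠ m2 := by omega
  have hsw : ∀ k, hget ((H.set i (hget H m2)).set m2 (hget H i)) k = hget H (swapF i m2 k) :=
    fun k => hget_swap H i m2 k hi hm2len hne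
  have hlen : ((H.set i (hget H m2)).set m2 (hget H i)).length = H.length := by simp
  constructor
  · intro a b hab hblen hane
    rw [hlen] at hblen
    rw [hsw a, hsw b]
    by_cases hbm : b = m2
    · have ha : a = i := by
        unfold childOf at hab hchild; omega
      have e1 : swapF i m2 b = i := by unfold swapF; split_ifs <;> omega
      have e2 : swapF i m2 a = m2 := by unfold swapF; split_ifs <;> omega
      rw [e1, e2]
      exact plt_asymm hbeat
    · by_cases hbi : b = i
      · have hai : a ≠ i := by
          unfold childOf at hab; omega
        have e1 : swapF i m2 b = m2 := by unfold swapF; split_ifs <;> omega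
        have e2 : swapF i m2 a = a := by
          have ham : a ≠ m2 := hane
          unfold swapF; split_ifs <;> omega
        rw [e1, e2]
        exact hpre.2 m2 hchild hm2len a (hbi ▸ hab)
      · by_cases hai : a = i
        · have e1 : swapF i m2 a = m2 := by unfold swapF; split_ifs <;> omega
          have e2 : swapF i m2 b = b := by unfold swapF; split_ifs <;> omega
          rw [e1, e2]
          rw [hai] at hab
          unfold childOf at hab
          rcases hab with hb | hb <;> rw [hb]
          · rw [hb] at hblen; exact hminl hblen
          · rw [hb] at hblen; exact hminr hblen
        · have e1 : swapF i m2 a = a := by unfold swapF; split_ifs <;> omega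
          have e2 : swapF i m2 b = b := by unfold swapF; split_ifs <;> omega
          rw [e1, e2]
          exact hpre.1 a b hab hblen hai
  · intro b hab hblen p hpm
    rw [hlen] at hblen
    have hp : p = i := by unfold childOf at hpm hchild; omega
    rw [hp]
    have hbbig : m2 < b := by unfold childOf at hab; omega
    rw [hsw b, hsw i]
    have e1 : swapF i m2 b = b := by unfold swapF; split_ifs <;> omega
    have e2 : swapF i m2 i = m2 := by unfold swapF; split_ifs <;> omega
    rw [e1, e2]
    exact hpre.1 m2 b hab hblen (by omega)

lemma sd_heap (H : List (Int × Int)) (i : Nat) : SDpre H i → IsHeap (siftDown H i) := by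
  fun_induction siftDown with
  | case1 H i m1 m2 h ih =>
    intro hpre
    by_cases h1 : 2*i+1 < H.length ∧ plt (hget H (2*i+1)) (hget H i)
    all_goals by_cases h2 : 2*i+2 < H.length ∧ plt (hget H (2*i+2)) (hget H m1)
    · -- m1 = l, m2 = r
      have e1 : m1 = 2*i+1 := if_pos h1
      have e2 : m2 = 2*i+2 := if_pos h2
      rw [e1] at h2
      apply ih
      rw [e2]
      apply swap_SDpre H i (2*i+2) hpre (by omega) h2.1 (by unfold childOf; omega)
        (plt_trans h2.2 h1.2)
      · intro _; exact plt_asymm h2.2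
      · intro _; exact plt_irrefl _
    · -- m1 = l, m2 = l
      have e1 : m1 = 2*i+1 := if_pos h1
      have e2 : m2 = m1 := if_neg h2
      rw [e1] at h2
      apply ih
      rw [e2, e1]
      apply swap_SDpre H i (2*i+1) hpre (by omega) h1.1 (by unfold childOf; omega) h1.2
      · intro _; exact plt_irrefl _
      · intro hr; intro hc; exact h2 ⟨hr, hc⟩
    · -- m1 = i, m2 = r
      have e1 : m1 = i := if_neg h1
      have e2 : m2 = 2*i+2 := if_pos h2
      rw [e1] at h2
      apply ih
      rw [e2]
      apply swap_SDpre H i (2*i+2) hpre (by omega) h2.1 (by unfold childOf; omega) h2.2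
      · intro hl hc
        exact h1 ⟨hl, plt_trans hc h2.2⟩
      · intro _; exact plt_irrefl _
    · -- no swap: contradiction with h
      exfalso
      have e1 : m1 = i := if_neg h1
      have e2 : m2 = m1 := if_neg h2
      exact h (by rw [e2, e1])
  | case2 H i m1 m2 h =>
    intro hpre
    have hm2 : i = m2 := by omega
    have hm1 : m1 = i := by
      by_cases h1 : 2*i+1 < H.length ∧ plt (hget H (2*i+1)) (hget H i)
      · have e1 : m1 = 2*i+1 := if_pos h1
        exfalso
        by_cases h2 : 2*i+2 < H.length ∧ plt (hget H (2*i+2)) (hget H m1)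
        · have e2 : m2 = 2*i+2 := if_pos h2
          omega
        · have e2 : m2 = m1 := if_neg h2
          omega
      · exact if_neg h1
    intro a b hab hblen
    by_cases hai : a = i
    · rw [hai] at hab ⊢
      unfold childOf at hab
      rcases hab with hb | hb <;> rw [hb] at hblen ⊢
      · intro hc
        by_cases h1 : 2*i+1 < H.length ∧ plt (hget H (2*i+1)) (hget H i)
        · have e1 : m1 = 2*i+1 := if_pos h1
          omega
        · exact h1 ⟨hblen, hc⟩
      · intro hc
        by_cases h2 : 2*i+2 < H.length ∧ plt (hget H (2*i+2)) (hget H m1)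
        · have e2 : m2 = 2*i+2 := if_pos h2
          omega
        · rw [hm1] at h2
          exact h2 ⟨hblen, hc⟩
    · exact hpre.1 a b hab hblen hai

lemma heap_root_min (H : List (Int × Int)) (hH : IsHeap H) :
    ∀ k, k < H.length → ¬ plt (hget H k) (hget H 0) := by
  intro k
  induction k using Nat.strong_induction_on with
  | _ k ih =>
    intro hk
    match k, hk with
    | 0, _ => exact plt_irrefl _
    | (k+1), hk =>
      have hp : childOf (k/2) (k+1) := by unfold childOf; omega
      have h1 := hH (k/2) (k+1) hp hk
      have h2 := ih (k/2) (by omega) (by omega)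
      exact not_plt_trans h2 h1

def bestWorker (times : List Int) : Nat :=
  (List.range' 1 (times.length - 1)).foldl
    (fun best i => if times.getD i 0 < times.getD best 0 then i else best) 0

lemma bw_aux (times : List Int) : ∀ m,
    ((List.range' 1 m).foldl
      (fun best i => if times.getD i 0 < times.getD best 0 then i else best) 0) ≤ m ∧
    ∀ i, i ≤ m →
      ¬ plt (times.getD i 0, (i : Int))
        (times.getD ((List.range' 1 m).foldl
          (fun best i => if times.getD i 0 < times.getD best 0 then i else best) 0) 0,
         (((List.range' 1 m).foldl
          (fun best i => if times.getD i 0 < times.getD best 0 then i else best) 0 : Nat) : Int)) := by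
  intro m
  induction m with
  | zero =>
    refine ⟨by simp, ?_⟩
    intro i hi
    interval_cases i
    simp [plt]
  | succ m ih =>
    obtain ⟨hle, hmin⟩ := ih
    rw [List.range'_1_concat, List.foldl_append]
    simp only [List.foldl_cons, List.foldl_nil]
    rw [Nat.add_comm 1 m]
    set b := (List.range' 1 m).foldl
      (fun best i => if times.getD i 0 < times.getD best 0 then i else best) 0 with hb
    by_cases hc : times.getD (m+1) 0 < times.getD b 0
    · rw [if_pos hc]
      refine ⟨by omega, ?_⟩
      intro i hi
      by_cases him : i ≤ m
      · have h1 := hmin i him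
        intro hcon
        apply h1
        refine plt_trans hcon ?_
        exact Or.inl hc
      · have : i = m + 1 := by omega
        rw [this]
        exact plt_irrefl _
    · rw [if_neg hc]
      refine ⟨by omega, ?_⟩
      intro i hi
      by_cases him : i ≤ m
      · exact hmin i him
      · have : i = m + 1 := by omega
        rw [this]
        intro hcon
        rcases hcon with h | h
        · exact hc h
        · have : (m + 1 : Int) < (b : Int) := h.2
          omega

lemma bestWorker_min (times : List Int) (hne : 0 < times.length) :
    bestWorker times < times.length ∧
    ∀ i, i < times.length →
      ¬ plt (times.getD i 0, (i : Int))
        (times.getD (bestWorker times) 0, ((bestWorker times : Nat) : Int)) := by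
  obtain ⟨h1, h2⟩ := bw_aux times (times.length - 1)
  unfold bestWorker
  exact ⟨by omega, fun i hi => h2 i (by omega)⟩

def Occ (times : List Int) (H : List (Int × Int)) : Prop :=
  ∀ k, k < H.length → ∃ j : Nat, j < times.length ∧ hget H k = (times.getD j 0, (j : Int))
def UniqueIdx (H : List (Int × Int)) : Prop :=
  ∀ k k', k < H.length → k' < H.length → (hget H k).2 = (hget H k').2 → k = k'
def Cover (H : List (Int × Int)) (n : Nat) : Prop :=
  ∀ j : Nat, j < n → ∃ k, k < H.length ∧ (hget H k).2 = (j : Int)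
def HInv (n : Nat) (times : List Int) (H : List (Int × Int)) : Prop :=
  times.length = n ∧ H.length = n ∧
  (∀ a b, childOf a b → b < H.length → a ≠ 0 → ¬ plt (hget H b) (hget H a)) ∧
  Occ times H ∧ UniqueIdx H ∧ Cover H n

lemma step_lemma (n : Nat) (times : List Int) (H : List (Int × Int)) (job : Int)
    (hn : 0 < n) (hinv : HInv n times H) :
    hget (siftDown H 0) 0 = (times.getD (bestWorker times) 0, ((bestWorker times : Nat) : Int)) ∧
    HInv n (times.set (bestWorker times) (times.getD (bestWorker times) 0 + job))
      ((siftDown H 0).set 0 (times.getD (bestWorker times) 0 + job, ((bestWorker times : Nat) : Int))) := by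
  obtain ⟨htl, hhl, her, hocc, huniq, hcov⟩ := hinv
  have hpre : SDpre H 0 := by
    constructor
    · exact fun a b hab hb ha => her a b hab hb ha
    · intro b _ _ p hp
      unfold childOf at hp; omega
  have hheap : IsHeap (siftDown H 0) := sd_heap H 0 hpre
  obtain ⟨f, hb, hinj, hsurj, hpt⟩ := sd_perm H 0
  have hlen1 : (siftDown H 0).length = H.length := sd_length H 0
  set H1 := siftDown H 0 with hH1
  -- invariants carried to H1
  have hocc1 : Occ times H1 := by
    intro k hk
    rw [hlen1] at hk
    rw [hpt k hk]
    exact hocc (f k) (hb k hk)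
  have huniq1 : UniqueIdx H1 := by
    intro k k' hk hk' heq
    rw [hlen1] at hk hk'
    rw [hpt k hk, hpt k' hk'] at heq
    exact hinj k k' hk hk' (huniq (f k) (f k') (hb k hk) (hb k' hk') heq)
  have hcov1 : Cover H1 n := by
    intro j hj
    obtain ⟨k, hk, hks⟩ := hcov j hj
    obtain ⟨k', hk', hfk⟩ := hsurj k hk
    refine ⟨k', by omega, ?_⟩
    rw [hpt k' hk', hfk, hks]
  -- the root is B's chosen worker
  obtain ⟨j0, hj0lt, hj0⟩ := hocc1 0 (by omega)
  have hroot_min : ∀ i : Nat, i < n → ¬ plt (times.getD i 0, (i : Int)) (hget H1 0) := by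
    intro i hi
    obtain ⟨k, hk, hks⟩ := hcov1 i hi
    obtain ⟨j, hjlt, hj⟩ := hocc1 k hk
    have hji : j = i := by
      rw [hj] at hks; simpa using hks
    have := heap_root_min H1 hheap k hk
    rw [hj, hji] at this
    exact this
  obtain ⟨hbw_lt, hbw_min⟩ := bestWorker_min times (by omega)
  have hroot : hget H1 0 = (times.getD (bestWorker times) 0, ((bestWorker times : Nat) : Int)) := by
    have h1 := hroot_min (bestWorker times) (by omega)
    rw [hj0] at h1 ⊢
    have h2 := hbw_min j0 (by omega)
    have := plt_antisymm h2 h1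
    rw [this]
  refine ⟨hroot, ?_, ?_, ?_, ?_, ?_, ?_⟩
  · simp [htl]
  · simp; omega
  · -- heap-except-root of the updated heap
    intro a b hab hblen hane
    simp only [List.length_set] at hblen
    have hbne : b ≠ 0 := by unfold childOf at hab; omega
    rw [hget_set_ne _ _ _ _ (Ne.symm hane), hget_set_ne _ _ _ _ (Ne.symm hbne)]
    exact hheap a b hab (by omega)
  · -- Occ of the updated pair
    intro k hk
    simp only [List.length_set] at hk ⊢
    by_cases hk0 : k = 0
    · rw [hk0, hget_set_self _ _ _ (by omega)]
      refine ⟨bestWorker times, by simp [htl]; omega, ?_⟩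
      rw [getD_set_self _ _ _ _ (by omega)]
    · rw [hget_set_ne _ _ _ _ (Ne.symm hk0)]
      obtain ⟨j, hjlt, hj⟩ := hocc1 k (by omega)
      have hjb : j ≠ bestWorker times := by
        intro hcon
        apply hk0
        apply huniq1 k 0 (by omega) (by omega)
        rw [hj, hroot, hcon]
      refine ⟨j, by simpa using hjlt, ?_⟩
      rw [hj, getD_set_ne _ _ _ _ _ (Ne.symm hjb)]
  · -- UniqueIdx: all second components unchanged
    have hsnd : ∀ k, (hget (H1.set 0 (times.getD (bestWorker times) 0 + job, ((bestWorker times : Nat) : Int))) k).2 = (hget H1 k).2 := by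
      intro k
      by_cases hk0 : k = 0
      · rw [hk0, hget_set_self _ _ _ (by omega), hroot]
      · rw [hget_set_ne _ _ _ _ (Ne.symm hk0)]
    intro k k' hk hk' heq
    simp only [List.length_set] at hk hk'
    rw [hsnd k, hsnd k'] at heq
    exact huniq1 k k' (by omega) (by omega) heq
  · intro j hj
    obtain ⟨k, hk, hks⟩ := hcov1 j hj
    refine ⟨k, by simpa using hk, ?_⟩
    by_cases hk0 : k = 0
    · rw [hk0, hget_set_self _ _ _ (by omega)]
      rw [hk0] at hks
      rw [hroot] at hks
      simpa using hks
    · rw [hget_set_ne _ _ _ _ (Ne.symm hk0)]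
      exact hks

lemma zipIdx_drop_eq (times : List Int) :
    times.zipIdx.drop 1 = (List.range' 1 (times.length - 1)).map
      (fun i => (times.getD i 0, i)) := by
  apply List.ext_getElem
  · simp
  · intro k h1 h2
    simp only [List.getElem_drop, List.getElem_zipIdx, List.getElem_map, List.getElem_range',
      Nat.one_mul, Nat.zero_add]
    simp only [List.length_drop, List.length_zipIdx] at h1
    have hk : 1 + k < times.length := by omega
    have : times.getD (1 + k) 0 = times[1 + k] := by
      simp [List.getD, List.getElem?_eq_getElem hk]
    rw [this]

lemma scan_pair (times : List Int) : ∀ m,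
    ((List.range' 1 m).foldl
        (fun (b : Nat × Int) i => if times.getD i 0 < b.2 then (i, times.getD i 0) else b)
        (0, times.getD 0 0)) =
      (((List.range' 1 m).foldl
          (fun best i => if times.getD i 0 < times.getD best 0 then i else best) 0 : Nat),
        times.getD ((List.range' 1 m).foldl
          (fun best i => if times.getD i 0 < times.getD best 0 then i else best) 0) 0) := by
  intro m
  induction m with
  | zero => simp
  | succ m ih =>
    rw [List.range'_1_concat, List.foldl_append, List.foldl_append, ih]
    simp only [List.foldl_cons, List.foldl_nil]
    by_cases hc : times.getD (1 + m) 0 <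
        times.getD ((List.range' 1 m).foldl
          (fun best i => if times.getD i 0 < times.getD best 0 then i else best) 0) 0
    · rw [if_pos hc, if_pos hc]
    · rw [if_neg hc, if_neg hc]

lemma scan_eq (times : List Int) :
    (times.zipIdx.drop 1).foldl
      (fun (b : Nat × Int) p => if p.1 < b.2 then (p.2, p.1) else b) (0, times.getD 0 0) =
    (bestWorker times, times.getD (bestWorker times) 0) := by
  rw [zipIdx_drop_eq, List.foldl_map]
  exact scan_pair times (times.length - 1)

lemma fold_eq (n : Nat) (hn : 0 < n) :
    ∀ (jobs : List Int) (res : List (Int × Int)) (times : List Int) (H : List (Int × Int)),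
      HInv n times H →
      (jobs.foldl (fun (st : List (Int × Int) × List (Int × Int)) job =>
          let H := siftDown st.2 0
          let p := hget H 0
          (st.1 ++ [(p.2, p.1)], H.set 0 (p.1 + job, p.2))) (res, H)).1 =
      (jobs.foldl (fun (st : List (Int × Int) × List Int) job =>
          let times := st.2
          let b := (times.zipIdx.drop 1).foldl
            (fun (b : Nat × Int) p => if p.1 < b.2 then (p.2, p.1) else b) (0, times.getD 0 0)
          (st.1 ++ [((b.1 : Int), b.2)], times.set b.1 (b.2 + job))) (res, times)).1 := by
  intro jobs
  induction jobs with
  | nil => intro res times H _; rfl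
  | cons job rest ih =>
    intro res times H hinv
    obtain ⟨hroot, hinv'⟩ := step_lemma n times H job hn hinv
    simp only [List.foldl_cons]
    rw [scan_eq, hroot]
    exact ih _ _ _ hinv'

lemma inv_init (n : Nat) :
    HInv n (List.replicate n 0) ((List.range n).map (fun i : Nat => ((0 : Int), (i : Int)))) := by
  have hlen : ((List.range n).map (fun i : Nat => ((0 : Int), (i : Int)))).length = n := by
    rw [List.length_map, List.length_range]
  have hget_init : ∀ k, k < n →
      hget ((List.range n).map (fun i : Nat => ((0 : Int), (i : Int)))) k = (0, (k : Int)) := by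
    intro k hk
    have h1 : ((List.range n).map (fun i : Nat => ((0 : Int), (i : Int))))[k]? = some (0, (k : Int)) := by
      rw [List.getElem?_map, List.getElem?_range hk]; rfl
    simp [hget, List.getD, h1]
  refine ⟨by simp, hlen, ?_, ?_, ?_, ?_⟩
  · intro a b hab hblen hane
    rw [hlen] at hblen
    have hba : a < b := by unfold childOf at hab; omega
    rw [hget_init b hblen, hget_init a (by omega)]
    intro hcon
    rcases hcon with h | h
    · simp at h
    · have := h.2; simp at this; omega
  · intro k hk
    rw [hlen] at hk
    rw [hget_init k hk]
    exact ⟨k, by simpa using hk, by simp⟩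
  · intro k k' hk hk' heq
    rw [hlen] at hk hk'
    rw [hget_init k hk, hget_init k' hk'] at heq
    simpa using heq
  · intro j hj
    refine ⟨j, by omega, by rw [hget_init j hj]⟩

-- ===== VERDICT (by name: the statement is the Claim_ definition above) =====
theorem assign_jobs_spec : Claim_equal_assign_jobs := by
  intro n_workers jobs _ hpre
  unfold Spec_assign_jobs assign_jobs assign_jobs_alt
  rcases hpre with h | h
  · subst h; rfl
  · have hn : 0 < n_workers.toNat := by omega
    exact fold_eq n_workers.toNat hn jobs [] _ _ (inv_init n_workers.toNat)
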